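-- pv_equiv track=rewrite | github.com/deeppavlov/dialogue2graph | dialog2graph/metrics/no_llm_metrics/keys2graph/metrics.py | _collapse_multiedges
-- ===== SOURCE A (Python) =====
-- def _collapse_multiedges(edges):
--     collapsed_edges = {}
--     for u, v, data in edges:
--         key = f"{u}->{v}"
--         if key not in collapsed_edges:
--             collapsed_edges[key] = []
--         if isinstance(data["utterances"], str):
--             collapsed_edges[key].append(data["utterances"])
--         elif isinstance(data["utterances"], list):
--             collapsed_edges[key].extend(data["utterances"])
--     return collapsed_edges
-- ===== SOURCE B (Python) =====
-- def _collapse_multiedges(edges):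
--     # two-pass: collect the endpoint keys in first-occurrence order, then build
--     # each group's utterance list by a per-key scan (dict comprehension)
--     keys = list(dict.fromkeys(f"{u}->{v}" for u, v, _ in edges))
--
--     def utts(data):
--         x = data["utterances"]
--         if isinstance(x, str):
--             return [x]
--         if isinstance(x, list):
--             return list(x)
--         return []
--
--     return {k: [s for u, v, d in edges if f"{u}->{v}" == k for s in utts(d)]
--             for k in keys}
-- ===== Notes on version B (the rewrite author's own statement) =====
-- stated objective: alternative
-- what changed: A builds the grouped dict in a single pass, mutating per-key accumulator lists as it scans; B makes two passes: it first dedups the endpoint keys in first-occurrence order (dict.fromkeys) and then builds each group's utterance list with a per-key scan in a dict comprehension.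
import Mathlib
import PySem

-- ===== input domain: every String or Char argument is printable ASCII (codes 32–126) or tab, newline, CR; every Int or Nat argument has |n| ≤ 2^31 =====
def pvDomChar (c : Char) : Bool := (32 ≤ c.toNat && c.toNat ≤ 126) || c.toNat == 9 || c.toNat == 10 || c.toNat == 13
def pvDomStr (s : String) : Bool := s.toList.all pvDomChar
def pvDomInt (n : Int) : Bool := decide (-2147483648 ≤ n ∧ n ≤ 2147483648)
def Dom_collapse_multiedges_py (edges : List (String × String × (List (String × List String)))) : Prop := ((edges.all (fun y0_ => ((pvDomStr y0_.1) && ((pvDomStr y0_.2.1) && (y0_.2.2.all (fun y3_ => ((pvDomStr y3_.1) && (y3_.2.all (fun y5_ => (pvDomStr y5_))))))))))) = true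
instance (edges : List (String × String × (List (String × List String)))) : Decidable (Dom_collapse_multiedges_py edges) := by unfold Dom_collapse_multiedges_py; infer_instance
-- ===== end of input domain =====

-- B replaces A's single-pass dict accumulation by two passes (dedup the endpoint keys, then a per-key
-- scan building each group's list); same return value, objective: alternative decomposition.

-- ===== PORT A =====
-- f"{u}->{v}"
def pvKeyA (u v : String) : String := u ++ "->" ++ v

-- the loop body: 'if key not in collapsed_edges: …[key] = []' then the isinstance branches; in the
-- typed domain data["utterances"] is a list of strings, so the 'isinstance(.., list)' branch (extend)
-- is the one that fires; data["utterances"] is a first-match dict lookup (none = KeyError, kept out by Pre_).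
def pvAStep (d : PySem.Dict String (List String))
    (e : String × String × (List (String × List String))) : PySem.Dict String (List String) :=
  let key := pvKeyA e.1 e.2.1
  let d1 := if d.contains key then d else d.insert key []
  match (PySem.Dict.mk e.2.2).get? "utterances" with
  | some us => d1.insert key (d1.getD key [] ++ us)   -- collapsed_edges[key].extend(...)
  | none => d1                                        -- KeyError in Python; excluded by Pre_

def collapse_multiedges_py (edges : List (String × String × (List (String × List String)))) : List (String × List String) :=
  (edges.foldl pvAStep PySem.Dict.empty).items

-- ===== PORT B =====
-- f"{u}->{v}" for B
def pvKeyB (e : String × String × (List (String × List String))) : String := e.1 ++ "->" ++ e.2.1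

-- utts(d): in the typed domain data["utterances"] is a list, so 'list(x)' is returned;
-- a missing "utterances" key is a KeyError in Python (none here), kept out by Pre_.
def pvBUtts (data : List (String × List String)) : List String :=
  ((PySem.Dict.mk data).get? "utterances").getD []

def collapse_multiedges_py_alt (edges : List (String × String × (List (String × List String)))) : List (String × List String) :=
  let keys := PySem.List.dedup (edges.map pvKeyB)   -- list(dict.fromkeys(...))
  keys.map (fun k => (k, (edges.filter (fun e => pvKeyB e == k)).flatMap (fun e => pvBUtts e.2.2)))

-- ===== PRECONDITION & SPEC =====
-- Pre_ excludes exactly the inputs where some edge's data dict has no "utterances" key: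
-- there Python A (and B) raise KeyError.
def Pre_collapse_multiedges_py (edges : List (String × String × (List (String × List String)))) : Prop :=
  (edges.all (fun e => e.2.2.any (fun p => p.1 == "utterances"))) = true
instance (edges : List (String × String × (List (String × List String)))) : Decidable (Pre_collapse_multiedges_py edges) := by unfold Pre_collapse_multiedges_py; infer_instance

def pvWitness_collapse_multiedges_py : (List (String × String × (List (String × List String)))) :=
  [("a", "b", [("utterances", ["hi"])]), ("a", "b", [("utterances", ["yo", "x"])]), ("b", "a", [("utterances", [])])]

def Spec_collapse_multiedges_py (edges : List (String × String × (List (String × List String)))) (out : List (String × List String)) : Prop := out = collapse_multiedges_py_alt edges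
instance (edges : List (String × String × (List (String × List String)))) (out : List (String × List String)) : Decidable (Spec_collapse_multiedges_py edges out) := by unfold Spec_collapse_multiedges_py; infer_instance

-- ===== CLAIM (what is proved, stated in full; the proofs are below) =====
def Claim_equal_collapse_multiedges_py : Prop := ∀ (edges : List (String × String × (List (String × List String)))), Dom_collapse_multiedges_py edges → Pre_collapse_multiedges_py edges → Spec_collapse_multiedges_py edges (collapse_multiedges_py edges)

-- ===== LEMMAS AND PROOFS =====

-- under Pre_, the lookup data["utterances"] succeeds
lemma pvUtts_some (data : List (String × List String))
    (h : data.any (fun p => p.1 == "utterances") = true) :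
    ∃ us, (PySem.Dict.mk data).get? "utterances" = some us := by
  induction data with
  | nil => simp at h
  | cons p rest ih =>
    rw [PySem.Dict.get?_mk_cons]
    by_cases hp : (p.1 == "utterances") = true
    · exact ⟨p.2, by simp [hp]⟩
    · simp only [List.any_cons, hp, Bool.false_or] at h
      simpa [hp] using ih h

-- invariant of A's loop: starting from a dict whose items are ks.map (k, g k) with ks nodup,
-- the fold produces the deduped extended key list, each key paired with its accumulated group.
lemma pvInvariant (edges : List (String × String × (List (String × List String))))
    (ks : List String) (g : String → List String)
    (hnd : ks.Nodup)
    (hpre : ∀ e ∈ edges, e.2.2.any (fun p => p.1 == "utterances") = true) :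
    (edges.foldl pvAStep (PySem.Dict.mk (ks.map (fun k => (k, g k))))).items
      = (PySem.Set.update ks (edges.map pvKeyB)).map
          (fun k => (k, (if k ∈ ks then g k else []) ++
            (edges.filter (fun e => pvKeyB e == k)).flatMap (fun e => pvBUtts e.2.2))) := by
  induction edges generalizing ks g with
  | nil =>
    simp only [List.foldl_nil, List.map_nil, PySem.Set.update_nil, List.filter_nil,
      List.flatMap_nil, List.append_nil]
    apply List.map_congr_left
    intro k hk
    simp [hk]
  | cons e es ih =>
    obtain ⟨us, hus⟩ := pvUtts_some e.2.2 (hpre e List.mem_cons_self)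
    have hAB : pvKeyA e.1 e.2.1 = pvKeyB e := rfl
    have hkeys : (PySem.Dict.mk (ks.map (fun k => (k, g k)))).keys = ks := by
      rw [PySem.Dict.keys_mk, List.map_map]
      rw [show ((fun x : String × List String => x.1) ∘ fun k => (k, g k)) = id from rfl, List.map_id]
    have hcont : (PySem.Dict.mk (ks.map (fun k => (k, g k)))).contains (pvKeyB e)
        = decide (pvKeyB e ∈ ks) := by
      rw [PySem.Dict.contains_eq_decide_mem_keys, hkeys]
    have hpre' : ∀ e' ∈ es, (e'.2.2.any fun p => p.1 == "utterances") = true :=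
      fun e' he' => hpre e' (List.mem_cons_of_mem _ he')
    have hfil : ∀ k : String, ((e :: es).filter (fun e' => pvKeyB e' == k)).flatMap (fun e' => pvBUtts e'.2.2)
        = (if pvKeyB e = k then pvBUtts e.2.2 else []) ++ (es.filter (fun e' => pvKeyB e' == k)).flatMap (fun e' => pvBUtts e'.2.2) := by
      intro k
      rw [List.filter_cons]
      by_cases hke : pvKeyB e = k
      · simp [hke]
      · simp [hke]
    by_cases hmem : pvKeyB e ∈ ks
    · -- the key is already present: in-place overwrite with the extended list
      have hstep : pvAStep (PySem.Dict.mk (ks.map (fun k => (k, g k)))) e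
          = PySem.Dict.mk (ks.map (fun k => (k, if k = pvKeyB e then g (pvKeyB e) ++ us else g k))) := by
        unfold pvAStep
        rw [hAB]
        simp only [hus]
        rw [if_pos (by rw [hcont]; simp [hmem])]
        have hgd : (PySem.Dict.mk (ks.map (fun k => (k, g k)))).getD (pvKeyB e) [] = g (pvKeyB e) := by
          apply PySem.Dict.getD_of_mem_items
          · exact List.mem_map.2 ⟨pvKeyB e, hmem, rfl⟩
          · rw [hkeys]; exact hnd
        rw [hgd]
        apply PySem.Dict.ext
        rw [PySem.Dict.items_insert_of_contains _ _ (by rw [hcont]; simp [hmem])]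
        show List.map _ (ks.map (fun k => (k, g k))) = _
        rw [List.map_map]
        refine List.map_congr_left (fun k hkk => ?_)
        by_cases hke : k = pvKeyB e <;> simp [Function.comp, hke]
      rw [List.foldl_cons, hstep, ih ks _ hnd hpre']
      have hset : PySem.Set.update ks ((e :: es).map pvKeyB) = PySem.Set.update ks (es.map pvKeyB) := by
        rw [List.map_cons, PySem.Set.update_cons]
        congr 1
        simp only [PySem.Set.add]
        rw [if_pos (by simpa [PySem.Set.contains] using hmem)]
      rw [hset]
      refine List.map_congr_left (fun k hkk => ?_)
      rw [hfil k]
      by_cases hke : k = pvKeyB e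
      · subst hke; simp [hmem, pvBUtts, hus, List.append_assoc]
      · have hke' : pvKeyB e ≠ k := fun h => hke h.symm
        simp [hke, hke']
    · -- fresh key: append (key, []) then overwrite it with the utterances
      have hstep : pvAStep (PySem.Dict.mk (ks.map (fun k => (k, g k)))) e
          = PySem.Dict.mk ((ks ++ [pvKeyB e]).map (fun k => (k, if k = pvKeyB e then us else g k))) := by
        unfold pvAStep
        rw [hAB]
        simp only [hus]
        rw [if_neg (by rw [hcont]; simp [hmem])]
        rw [PySem.Dict.getD_insert_self, PySem.Dict.insert_insert_self, List.nil_append]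
        apply PySem.Dict.ext
        rw [PySem.Dict.items_insert_of_not_contains _ _ (by rw [hcont]; simp [hmem])]
        show (ks.map (fun k => (k, g k))) ++ [(pvKeyB e, us)] = _
        rw [List.map_append]
        congr 1
        · refine List.map_congr_left (fun k hkk => ?_)
          have hne : k ≠ pvKeyB e := fun h => hmem (h ▸ hkk)
          simp [hne]
        · simp
      have hnd' : (ks ++ [pvKeyB e]).Nodup := by
        rw [List.nodup_append]
        refine ⟨hnd, List.nodup_singleton _, ?_⟩
        intro a ha b hb heq
        rw [List.mem_singleton] at hb
        subst hb
        exact hmem (heq ▸ ha)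
      rw [List.foldl_cons, hstep, ih (ks ++ [pvKeyB e]) _ hnd' hpre']
      have hset : PySem.Set.update ks ((e :: es).map pvKeyB) = PySem.Set.update (ks ++ [pvKeyB e]) (es.map pvKeyB) := by
        rw [List.map_cons, PySem.Set.update_cons]
        congr 1
        simp only [PySem.Set.add]
        rw [if_neg (by simp [PySem.Set.contains, hmem])]
      rw [hset]
      refine List.map_congr_left (fun k hkk => ?_)
      rw [hfil k]
      by_cases hke : k = pvKeyB e
      · subst hke; simp [hmem, pvBUtts, hus]
      · have hke' : pvKeyB e ≠ k := fun h => hke h.symm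
        simp [hke, hke', List.mem_append]

theorem pv_main (edges : List (String × String × (List (String × List String))))
    (hpre : Pre_collapse_multiedges_py edges) :
    collapse_multiedges_py edges = collapse_multiedges_py_alt edges := by
  unfold Pre_collapse_multiedges_py at hpre
  simp only [List.all_eq_true] at hpre
  have h := pvInvariant edges [] (fun _ => []) List.nodup_nil
    (fun e he => by simpa using hpre e he)
  unfold collapse_multiedges_py collapse_multiedges_py_alt
  simp only [List.map_nil] at h
  rw [show PySem.Dict.empty = PySem.Dict.mk ([] : List (String × List String)) from rfl, h]
  rw [show PySem.Set.update [] (edges.map pvKeyB) = PySem.List.dedup (edges.map pvKeyB) from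
    PySem.Set.update_nil_left _]
  simp

-- ===== VERDICT (by name: the statement is the Claim_ definition above) =====
theorem collapse_multiedges_py_spec : Claim_equal_collapse_multiedges_py := by
  intro edges _ hpre
  unfold Spec_collapse_multiedges_py
  exact pv_main edges hpre
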